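-- pv_equiv track=rewrite | github.com/dusancv22/CC-Release-Monitor | CC-Release-Monitor/src/release_parser.py | _extract_commit_body
-- ===== SOURCE A (Python) =====
-- def _extract_commit_body(message: str) -> str:
--     """Extract commit body (everything after first line) from commit message."""
--     if not message:
--         return ""
--
--     lines = message.strip().split('\n')
--     if len(lines) <= 2:  # Only subject or subject + empty line
--         return ""
--
--     # Join all lines after the first empty line
--     body_lines = []
--     found_empty = False
--
--     for i, line in enumerate(lines[1:], 1):
--         if not line.strip() and not found_empty:
--             found_empty = True
--             continue
--         elif found_empty or line.strip():
--             body_lines.append(line)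
--
--     return '\n'.join(body_lines).strip()
-- ===== SOURCE B (Python) =====
-- def _extract_commit_body(message: str) -> str:
--     """Extract commit body (everything after first line) from commit message."""
--     if not message:
--         return ""
--
--     lines = message.strip().split('\n')
--     if len(lines) <= 2:  # Only subject or subject + empty line
--         return ""
--
--     # Body = all lines after the first, with the first whitespace-only line
--     # (if any) removed by slicing around its position.
--     body = lines[1:]
--     idx = next((i for i, l in enumerate(body) if not l.strip()), None)
--     if idx is not None:
--         body = body[:idx] + body[idx + 1:]
--     return '\n'.join(body).strip()
-- ===== Notes on version B (the rewrite author's own statement) =====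
-- stated objective: simpler
-- what changed: Replaced the boolean-flag accumulation loop over lines[1:] with locating the index of the first whitespace-only line and slicing it out (body[:idx] + body[idx+1:]).
import Mathlib
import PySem

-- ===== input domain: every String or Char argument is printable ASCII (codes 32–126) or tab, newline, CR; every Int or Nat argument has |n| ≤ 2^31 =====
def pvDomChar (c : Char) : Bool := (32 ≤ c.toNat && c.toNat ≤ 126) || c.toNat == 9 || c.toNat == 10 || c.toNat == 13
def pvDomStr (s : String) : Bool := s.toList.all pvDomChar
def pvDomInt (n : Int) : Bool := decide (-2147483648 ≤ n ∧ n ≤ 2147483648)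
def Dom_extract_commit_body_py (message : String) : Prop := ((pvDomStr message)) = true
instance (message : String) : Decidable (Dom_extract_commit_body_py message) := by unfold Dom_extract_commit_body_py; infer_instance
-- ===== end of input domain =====

-- B replaces A's boolean-flag accumulation loop by locating the first blank line's
-- index and slicing it out (objective: simpler decomposition; same cost).


-- ===== PORT A =====
-- the for-loop over lines[1:] with the found_empty flag (branches in source order)
def pvLoopA : List (List Char) → Bool → List (List Char)
  | [], _ => []
  | l :: rest, found =>
    if (PySem.Chars.strip l).isEmpty && !found then pvLoopA rest true
    else if found || !(PySem.Chars.strip l).isEmpty then l :: pvLoopA rest found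
    else pvLoopA rest found

def extract_commit_body_py (message : String) : String :=
  if message = "" then ""
  else
    let lines := PySem.Chars.splitOn (PySem.Chars.strip message.toList) ['\n']
    if lines.length ≤ 2 then ""
    else
      String.ofList (PySem.Chars.strip (PySem.Chars.join ['\n'] (pvLoopA (PySem.List.slice lines (some 1) none) false)))

-- ===== PORT B =====
def extract_commit_body_py_alt (message : String) : String :=
  if message = "" then ""
  else
    let lines := PySem.Chars.splitOn (PySem.Chars.strip message.toList) ['\n']
    if lines.length ≤ 2 then ""
    else
      let body := PySem.List.slice lines (some 1) none
      -- idx = next((i for i, l in enumerate(body) if not l.strip()), None)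
      let body := match body.findIdx? (fun l => (PySem.Chars.strip l).isEmpty) with
        | none => body
        -- body[:i] ++ body[i+1:] with 0 ≤ i < len body: exactly take/drop
        | some i => body.take i ++ body.drop (i + 1)
      String.ofList (PySem.Chars.strip (PySem.Chars.join ['\n'] body))

-- ===== PRECONDITION & SPEC =====
def Spec_extract_commit_body_py (message : String) (out : String) : Prop := out = extract_commit_body_py_alt message
instance (message : String) (out : String) : Decidable (Spec_extract_commit_body_py message out) := by unfold Spec_extract_commit_body_py; infer_instance

-- ===== CLAIM (what is proved, stated in full; the proofs are below) =====
def Claim_equal_extract_commit_body_py : Prop := ∀ (message : String), Dom_extract_commit_body_py message → Spec_extract_commit_body_py message (extract_commit_body_py message)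

-- ===== LEMMAS AND PROOFS =====

-- once the flag is set, the loop keeps every remaining line
theorem pvLoopA_true (l : List (List Char)) : pvLoopA l true = l := by
  induction l with
  | nil => rfl
  | cons x rest ih => simp [pvLoopA, ih]

-- with the flag unset, the loop removes exactly the first blank line
theorem pvLoopA_false (l : List (List Char)) :
    pvLoopA l false =
      match l.findIdx? (fun s => (PySem.Chars.strip s).isEmpty) with
      | none => l
      | some i => l.take i ++ l.drop (i + 1) := by
  induction l with
  | nil => rfl
  | cons x rest ih =>
    by_cases hx : (PySem.Chars.strip x).isEmpty
    · simp [pvLoopA, hx, pvLoopA_true, List.findIdx?_cons]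
    · simp only [pvLoopA, Bool.false_and, Bool.false_or,
        Bool.not_false, if_true, ih, List.findIdx?_cons, hx]
      cases h : rest.findIdx? (fun s => (PySem.Chars.strip s).isEmpty) with
      | none => simp
      | some i => simp [List.take_succ_cons, List.drop_succ_cons]

-- ===== VERDICT (by name: the statement is the Claim_ definition above) =====
theorem extract_commit_body_py_spec : Claim_equal_extract_commit_body_py := by
  intro message _
  unfold Spec_extract_commit_body_py extract_commit_body_py extract_commit_body_py_alt
  by_cases h0 : message = ""
  · simp [h0]
  · simp only [h0, if_false]
    split
    · rfl
    · rw [pvLoopA_false]
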